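-- pv_equiv track=rewrite | github.com/yunuskoca/TemelPythonProject | patika_temel_Python _eg_proje.py | terscevir
-- ===== SOURCE A (Python) =====
-- def terscevir(liste):
--     '''
--     iç içe listeleri tersine çeviren fonksiyon
--     '''
--     if type(liste) == list:
--         liste.reverse()
--     for i in liste:
--         if type(i) == list:
--             terscevir(i)
--         else:
--             break
--     return [liste]
-- ===== SOURCE B (Python) =====
-- def terscevir(liste):
--     '''
--     iç içe listeleri tersine çeviren fonksiyon (explicit worklist instead of recursion)
--     '''
--     stack = [liste]
--     while stack:
--         cur = stack.pop()
--         if type(cur) == list: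
--             cur.reverse()
--         for i in cur:
--             if type(i) == list:
--                 stack.append(i)
--             else:
--                 break
--     return [liste]
-- ===== Notes on version B (the rewrite author's own statement) =====
-- stated objective: alternative
-- what changed: Replaces A's recursive descent (reverse, then recurse into each sublist) with an explicit LIFO worklist that pops each list, reverses it in place and pushes its list elements, keeping the same type checks and break.
import Mathlib
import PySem

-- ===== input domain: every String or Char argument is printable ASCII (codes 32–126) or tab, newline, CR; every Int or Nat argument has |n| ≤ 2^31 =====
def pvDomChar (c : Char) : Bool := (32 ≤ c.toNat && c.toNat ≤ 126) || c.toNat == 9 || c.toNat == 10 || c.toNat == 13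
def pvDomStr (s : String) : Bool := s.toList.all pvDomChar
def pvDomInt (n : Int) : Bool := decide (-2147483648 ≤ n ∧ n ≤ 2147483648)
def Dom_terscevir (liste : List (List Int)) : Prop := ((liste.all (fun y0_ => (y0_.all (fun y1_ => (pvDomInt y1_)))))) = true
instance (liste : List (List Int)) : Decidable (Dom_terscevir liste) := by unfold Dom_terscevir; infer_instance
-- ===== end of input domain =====

-- B replaces A's recursion by an explicit LIFO worklist over the sublists (alternative
-- decomposition, same cost). Both Pythons mutate `liste` in place the same way; the
-- equivalence proved here is about the RETURN value.

-- ===== PORT A =====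
-- inner recursion level: reverse `i` in place; the for-loop then breaks at its first
-- (int) element, so it does nothing; the call returns [i]
def terscevirInner (l : List Int) : List (List Int) :=
  let l := l.reverse
  [l]

def terscevir (liste : List (List Int)) : List (List (List Int)) :=
  let liste := liste.reverse
  -- for i in liste: each i is a list, so terscevir(i) reverses i in place
  -- (the recursive call's return value is discarded; the mutated i is (terscevirInner i).headD [])
  let liste := liste.foldl (fun acc i => acc ++ [(terscevirInner i).headD []]) []
  [liste]

-- ===== PORT B =====
-- the while-loop after the first pop: the store holds the (already reversed) outer list,
-- the stack holds indices of the inner lists still to pop; popping an inner list reverses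
-- it in place, and its int elements push nothing (the for-loop breaks at once)
def terscevirGo (store : List (List Int)) : List Nat → List (List Int)
  | [] => store
  | i :: rest => terscevirGo (store.set i ((store.getD i []).reverse)) rest

def terscevir_alt (liste : List (List Int)) : List (List (List Int)) :=
  -- stack = [liste]; the first pop reverses the outer list and pushes every inner list
  let store := liste.reverse
  let stack := (List.range store.length).reverse  -- head = top of stack (last pushed)
  [terscevirGo store stack]

-- ===== PRECONDITION & SPEC =====
def Spec_terscevir (liste : List (List Int)) (out : List (List (List Int))) : Prop := out = terscevir_alt liste
instance (liste : List (List Int)) (out : List (List (List Int))) : Decidable (Spec_terscevir liste out) := by unfold Spec_terscevir; infer_instance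

-- ===== CLAIM (what is proved, stated in full; the proofs are below) =====
def Claim_equal_terscevir : Prop := ∀ (liste : List (List Int)), Dom_terscevir liste → Spec_terscevir liste (terscevir liste)

-- ===== LEMMAS AND PROOFS =====
lemma foldl_inner (l : List (List Int)) (acc : List (List Int)) :
    l.foldl (fun acc i => acc ++ [(terscevirInner i).headD []]) acc
      = acc ++ l.map (fun i => i.reverse) := by
  induction l generalizing acc with
  | nil => simp
  | cons x xs ih =>
    rw [List.foldl_cons, ih]
    simp [terscevirInner]

lemma go_range (n : Nat) (store : List (List Int)) (h : n ≤ store.length) :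
    terscevirGo store ((List.range n).reverse)
      = (store.take n).map (fun i => i.reverse) ++ store.drop n := by
  induction n generalizing store with
  | zero => simp [terscevirGo]
  | succ n ih =>
    have hn : n < store.length := h
    rw [List.range_succ, List.reverse_append]
    simp only [List.reverse_singleton, List.singleton_append, terscevirGo]
    have htl : (store.take n).length = n := by simp [hn.le]
    rw [List.set_eq_take_append_cons_drop, if_pos hn,
        ih _ (by simp only [List.length_append, List.length_cons, List.length_take,
          List.length_drop]; omega),
        List.take_left' htl, List.drop_left' htl]
    rw [List.take_add_one, List.getElem?_eq_getElem hn, List.getD_eq_getElem _ _ hn]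
    simp only [Option.toList_some, List.map_append, List.map_cons, List.map_nil,
      List.append_assoc, List.cons_append, List.nil_append]

-- ===== VERDICT (by name: the statement is the Claim_ definition above) =====
theorem terscevir_spec : Claim_equal_terscevir := by
  intro liste _
  show _ = _
  unfold terscevir terscevir_alt
  dsimp only
  rw [foldl_inner, go_range _ _ le_rfl, List.take_length, List.drop_length, List.append_nil, List.nil_append]
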